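-- pv_equiv track=rewrite | github.com/Trhova/Scientific_writing_skill | scientific-writing-workbench/scripts/validate_citations.py | split_entries
-- ===== SOURCE A (Python) =====
-- def split_entries(text: str) -> tuple[list[str], list[str]]:
--     entries: list[str] = []
--     malformed: list[str] = []
--     index = 0
--     while True:
--         start = text.find("@", index)
--         if start < 0:
--             break
--         brace_start = text.find("{", start)
--         if brace_start < 0:
--             malformed.append(text[start:].strip())
--             break
--         depth = 0
--         end = brace_start
--         while end < len(text):
--             char = text[end]
--             if char == "{":
--                 depth += 1
--             elif char == "}":
--                 depth -= 1
--                 if depth == 0: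
--                     entries.append(text[start : end + 1].strip())
--                     index = end + 1
--                     break
--             end += 1
--         else:
--             malformed.append(text[start:].strip())
--             break
--     return entries, malformed
-- ===== SOURCE B (Python) =====
-- def split_entries(text: str) -> tuple[list[str], list[str]]:
--     entries: list[str] = []
--     malformed: list[str] = []
--     state = 0  # 0 = outside, 1 = after '@' waiting for '{', 2 = inside braces
--     start = 0
--     depth = 0
--     for i, ch in enumerate(text):
--         if state == 0:
--             if ch == "@":
--                 start = i
--                 state = 1
--         elif state == 1:
--             if ch == "{":
--                 depth = 1
--                 state = 2
--         else:
--             if ch == "{":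
--                 depth += 1
--             elif ch == "}":
--                 depth -= 1
--                 if depth == 0:
--                     entries.append(text[start : i + 1].strip())
--                     state = 0
--     if state != 0:
--         malformed.append(text[start:].strip())
--     return entries, malformed
-- ===== Notes on version B (the rewrite author's own statement) =====
-- stated objective: alternative
-- what changed: Replaced A's repeated str.find scans plus a nested brace-counting while loop with a single flat pass over the characters driven by an explicit 3-state automaton (outside / after-@ / inside-braces) that tracks only start and depth.
import Mathlib
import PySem

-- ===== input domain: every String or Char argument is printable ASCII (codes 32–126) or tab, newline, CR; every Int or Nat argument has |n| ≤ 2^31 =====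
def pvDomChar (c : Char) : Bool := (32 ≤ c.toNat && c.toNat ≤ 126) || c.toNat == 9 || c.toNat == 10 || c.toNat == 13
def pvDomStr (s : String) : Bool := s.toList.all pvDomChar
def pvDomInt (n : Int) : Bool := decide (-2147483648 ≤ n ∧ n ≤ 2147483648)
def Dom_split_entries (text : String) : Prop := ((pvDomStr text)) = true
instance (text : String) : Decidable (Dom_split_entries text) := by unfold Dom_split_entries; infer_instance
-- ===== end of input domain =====

-- B replaces A's repeated str.find scans plus nested brace-counting loop by one flat character automaton with a state variable (objective: alternative decomposition).
-- ===== PORT A =====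
-- text[a:b].strip() — both Pythons slice and strip identically at their emit points
def pvStrip (l : List Char) : String := String.ofList (PySem.Chars.strip l)

-- the inner `while end < len(text)` loop of A; returns the index `end` at which it breaks
-- (none = ran off the end, i.e. the `else` of the while). `rem` is structural fuel that merely
-- makes the descending index loop total; pvAInner supplies exactly the remaining length, so the
-- fuel never runs out before the `end < len(text)` test fails.
def pvAInnerGo (t : List Char) (rem ed : Nat) (depth : Int) : Option Nat :=
  match rem with
  | 0 => none
  | rem + 1 =>
    if h : ed < t.length then
      let c := t[ed]
      if c = '{' then pvAInnerGo t rem (ed + 1) (depth + 1)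
      else if c = '}' then
        if depth - 1 = 0 then some ed else pvAInnerGo t rem (ed + 1) (depth - 1)
      else pvAInnerGo t rem (ed + 1) depth
    else none

def pvAInner (t : List Char) (ed : Nat) (depth : Int) : Option Nat :=
  pvAInnerGo t (t.length - ed) ed depth

-- the outer `while True` loop of A; `fuel` only makes the loop total (index strictly increases
-- and stays ≤ len(text), so len(text)+1 rounds always suffice)
def pvAOuterGo (t : List Char) (fuel index : Nat) (entries malformed : List String) : List String × List String :=
  match fuel with
  | 0 => (entries, malformed)
  | fuel + 1 =>
    if _hs : PySem.Chars.findFrom t ['@'] (index : Int) < 0 then (entries, malformed)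
    else
      let s := (PySem.Chars.findFrom t ['@'] (index : Int)).toNat
      if _hb : PySem.Chars.findFrom t ['{'] (s : Int) < 0 then
        (entries, malformed ++ [pvStrip (PySem.List.slice t (some (s : Int)) none)])
      else
        match pvAInner t (PySem.Chars.findFrom t ['{'] (s : Int)).toNat 0 with
        | some ed =>
            pvAOuterGo t fuel (ed + 1)
              (entries ++ [pvStrip (PySem.List.slice t (some (s : Int)) (some ((ed : Int) + 1)))]) malformed
        | none => (entries, malformed ++ [pvStrip (PySem.List.slice t (some (s : Int)) none)])

def split_entries (text : String) : List String × List String :=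
  pvAOuterGo text.toList (text.toList.length + 1) 0 [] []

-- ===== PORT B =====
-- B's single pass over the characters: state 0 = pvBOutside, state 1 = pvBSeen (after '@'),
-- state 2 = pvBIn (inside braces); `rest` is the unread suffix of `t`, `i` the index of its head
mutual
def pvBOutside (t rest : List Char) (i : Nat) (ent mal : List String) : List String × List String :=
  match rest with
  | [] => (ent, mal)
  | c :: r => if c = '@' then pvBSeen t r (i + 1) i ent mal else pvBOutside t r (i + 1) ent mal

def pvBSeen (t rest : List Char) (i start : Nat) (ent mal : List String) : List String × List String :=
  match rest with
  | [] => (ent, mal ++ [pvStrip (PySem.List.slice t (some (start : Int)) none)])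
  | c :: r => if c = '{' then pvBIn t r (i + 1) start 1 ent mal else pvBSeen t r (i + 1) start ent mal

def pvBIn (t rest : List Char) (i start : Nat) (depth : Int) (ent mal : List String) : List String × List String :=
  match rest with
  | [] => (ent, mal ++ [pvStrip (PySem.List.slice t (some (start : Int)) none)])
  | c :: r =>
    if c = '{' then pvBIn t r (i + 1) start (depth + 1) ent mal
    else if c = '}' then
      if depth - 1 = 0 then
        pvBOutside t r (i + 1)
          (ent ++ [pvStrip (PySem.List.slice t (some (start : Int)) (some ((i : Int) + 1)))]) mal
      else pvBIn t r (i + 1) start (depth - 1) ent mal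
    else pvBIn t r (i + 1) start depth ent mal
end

def split_entries_alt (text : String) : List String × List String :=
  pvBOutside text.toList text.toList 0 [] []

-- ===== PRECONDITION & SPEC =====
def Spec_split_entries (text : String) (out : List String × List String) : Prop := out = split_entries_alt text
instance (text : String) (out : List String × List String) : Decidable (Spec_split_entries text out) := by unfold Spec_split_entries; infer_instance

-- ===== CLAIM (what is proved, stated in full; the proofs are below) =====
def Claim_equal_split_entries : Prop := ∀ (text : String), Dom_split_entries text → Spec_split_entries text (split_entries text)

-- ===== LEMMAS AND PROOFS =====

-- the break index of A's inner scan lies between the scan's start and the end of the text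
theorem pvAInner_some_bounds (t : List Char) :
    ∀ rem ed depth m, pvAInnerGo t rem ed depth = some m → ed ≤ m ∧ m < t.length := by
  intro rem
  induction rem with
  | zero => intro ed depth m hm; simp [pvAInnerGo] at hm
  | succ rem ih =>
    intro ed depth m hm
    rw [pvAInnerGo] at hm
    by_cases h : ed < t.length
    · rw [dif_pos h] at hm
      by_cases h1 : t[ed] = '{'
      · rw [if_pos h1] at hm; have := ih (ed + 1) (depth + 1) m hm; omega
      · rw [if_neg h1] at hm
        by_cases h2 : t[ed] = '}'
        · rw [if_pos h2] at hm
          by_cases h3 : depth - 1 = 0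
          · rw [if_pos h3] at hm; simp at hm; omega
          · rw [if_neg h3] at hm; have := ih (ed + 1) (depth - 1) m hm; omega
        · rw [if_neg h2] at hm; have := ih (ed + 1) depth m hm; omega
    · rw [dif_neg h] at hm; simp at hm

-- s.find(sub, k) ≥ 0 forces k ≤ len(s) (with k > len(s) Python's find returns -1)
theorem pvFindFrom_le_len (t sub : List Char) (k : Nat)
    (h : ¬ PySem.Chars.findFrom t sub (k : Int) < 0) : k ≤ t.length := by
  by_contra hk
  rw [Nat.not_le] at hk
  have : PySem.Chars.findFrom t sub (k : Int) = -1 := by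
    simp [PySem.Chars.findFrom]
    omega
  omega

-- [c] is a prefix of t.drop i exactly when t[i] is c
theorem pvSingle_prefix (c : Char) (t : List Char) (i : Nat) : [c] <+: t.drop i ↔ t[i]? = some c := by
  rw [← List.head?_drop]
  cases t.drop i with
  | nil => simp
  | cons a l => simp [List.cons_prefix_cons, eq_comm]

-- what a non-negative single-character find means: first occurrence of c at or after k
theorem pvFindFrom_char_spec (t : List Char) (c : Char) (k : Nat)
    (h : ¬ PySem.Chars.findFrom t [c] (k : Int) < 0) :
    k ≤ (PySem.Chars.findFrom t [c] (k : Int)).toNat ∧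
    (PySem.Chars.findFrom t [c] (k : Int)).toNat < t.length ∧
    t[(PySem.Chars.findFrom t [c] (k : Int)).toNat]? = some c ∧
    ∀ j, k ≤ j → j < (PySem.Chars.findFrom t [c] (k : Int)).toNat → t[j]? ≠ some c := by
  have hk := pvFindFrom_le_len t [c] k h
  have hne : PySem.Chars.findFrom t [c] (k : Int) ≠ -1 := by
    intro he; rw [he] at h; omega
  obtain ⟨h1, h2, h3⟩ := PySem.Chars.findFrom_natCast_spec t [c] k hk hne
  rw [pvSingle_prefix] at h2
  have hlt : (PySem.Chars.findFrom t [c] (k : Int)).toNat < t.length :=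
    (List.getElem?_eq_some_iff.mp h2).1
  refine ⟨by omega, hlt, h2, ?_⟩
  intro j hj1 hj2 hc
  exact h3 j hj1 hj2 ((pvSingle_prefix c t j).mpr hc)

-- a negative find is -1, hence "no occurrence from k on"
theorem pvFindFrom_char_none (t : List Char) (c : Char) (k : Nat) (hk : k ≤ t.length)
    (h : PySem.Chars.findFrom t [c] (k : Int) < 0) : c ∉ t.drop k := by
  have he : PySem.Chars.findFrom t [c] (k : Int) = -1 := by
    by_contra hne
    obtain ⟨h1, _, _⟩ := PySem.Chars.findFrom_natCast_spec t [c] k hk hne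
    omega
  have := (PySem.Chars.findFrom_natCast_eq_neg_one_iff t [c] k hk).mp he
  rw [List.singleton_infix_iff] at this
  exact this

-- with no '@' ahead, state 0 just consumes the rest
theorem pvB_out_no_at (t : List Char) (ent mal : List String) :
    ∀ rest (i : Nat), '@' ∉ rest → pvBOutside t rest i ent mal = (ent, mal) := by
  intro rest
  induction rest with
  | nil => intro i _; rfl
  | cons c r ih =>
    intro i h
    simp at h
    rw [pvBOutside, if_neg (fun hc => h.1 hc.symm)]
    exact ih (i + 1) h.2

-- state 0 skips exactly to the first '@' at or after i and records it as start
theorem pvB_out_skip (t : List Char) (ent mal : List String) :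
    ∀ n i p, p - i = n → i ≤ p → p < t.length → t[p]? = some '@' →
    (∀ j, i ≤ j → j < p → t[j]? ≠ some '@') →
    pvBOutside t (t.drop i) i ent mal = pvBSeen t (t.drop (p + 1)) (p + 1) p ent mal := by
  intro n
  induction n with
  | zero =>
    intro i p hn hip hp hat _
    have hip' : i = p := by omega
    subst hip'
    rw [List.drop_eq_getElem_cons hp, pvBOutside,
      if_pos (by simpa [List.getElem?_eq_getElem hp] using hat)]
  | succ n ih =>
    intro i p hn hip hp hat hmin
    have hi : i < t.length := by omega
    rw [List.drop_eq_getElem_cons hi, pvBOutside,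
      if_neg (by have := hmin i le_rfl (by omega); simpa [List.getElem?_eq_getElem hi] using this)]
    exact ih (i + 1) p (by omega) (by omega) hp hat (fun j h1 h2 => hmin j (by omega) h2)

-- with no '{' ahead, state 1 consumes the rest and emits the malformed tail
theorem pvB_seen_no_brace (t : List Char) (start : Nat) (ent mal : List String) :
    ∀ rest (i : Nat), '{' ∉ rest →
    pvBSeen t rest i start ent mal = (ent, mal ++ [pvStrip (PySem.List.slice t (some (start : Int)) none)]) := by
  intro rest
  induction rest with
  | nil => intro i _; rfl
  | cons c r ih =>
    intro i h
    simp at h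
    rw [pvBSeen, if_neg (fun hc => h.1 hc.symm)]
    exact ih (i + 1) h.2

-- state 1 skips exactly to the first '{' at or after i and enters the braces with depth 1
theorem pvB_seen_skip (t : List Char) (start : Nat) (ent mal : List String) :
    ∀ n i q, q - i = n → i ≤ q → q < t.length → t[q]? = some '{' →
    (∀ j, i ≤ j → j < q → t[j]? ≠ some '{') →
    pvBSeen t (t.drop i) i start ent mal = pvBIn t (t.drop (q + 1)) (q + 1) start 1 ent mal := by
  intro n
  induction n with
  | zero =>
    intro i q hn hiq hq hbr _
    have hiq' : i = q := by omega
    subst hiq'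
    rw [List.drop_eq_getElem_cons hq, pvBSeen,
      if_pos (by simpa [List.getElem?_eq_getElem hq] using hbr)]
  | succ n ih =>
    intro i q hn hiq hq hbr hmin
    have hi : i < t.length := by omega
    rw [List.drop_eq_getElem_cons hi, pvBSeen,
      if_neg (by have := hmin i le_rfl (by omega); simpa [List.getElem?_eq_getElem hi] using this)]
    exact ih (i + 1) q (by omega) (by omega) hq hbr (fun j h1 h2 => hmin j (by omega) h2)

-- state 2 tracks A's inner brace scan step for step
theorem pvB_in_inner (t : List Char) (start : Nat) (ent mal : List String) :
    ∀ rem ed depth, t.length - ed = rem →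
    pvBIn t (t.drop ed) ed start depth ent mal =
      (match pvAInnerGo t rem ed depth with
       | some m => pvBOutside t (t.drop (m + 1)) (m + 1)
           (ent ++ [pvStrip (PySem.List.slice t (some (start : Int)) (some ((m : Int) + 1)))]) mal
       | none => (ent, mal ++ [pvStrip (PySem.List.slice t (some (start : Int)) none)])) := by
  intro rem
  induction rem with
  | zero =>
    intro ed depth hn
    have hed : t.length ≤ ed := by omega
    rw [List.drop_eq_nil_of_le hed]
    rfl
  | succ rem ih =>
    intro ed depth hn
    have hed : ed < t.length := by omega
    rw [List.drop_eq_getElem_cons hed, pvBIn, pvAInnerGo, dif_pos hed]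
    by_cases h1 : t[ed] = '{'
    · rw [if_pos h1]
      simp only [h1]
      exact ih (ed + 1) (depth + 1) (by omega)
    · rw [if_neg h1]
      simp only [if_neg h1]
      by_cases h2 : t[ed] = '}'
      · rw [if_pos h2]
        simp only [h2]
        by_cases h3 : depth - 1 = 0
        · simp [h3]
        · rw [if_neg h3, if_neg h3]
          exact ih (ed + 1) (depth - 1) (by omega)
      · rw [if_neg h2]
        simp only [if_neg h2]
        exact ih (ed + 1) depth (by omega)

-- A's outer loop from index i equals B's automaton started in state 0 at position i
theorem pv_main (t : List Char) :
    ∀ fuel i ent mal, i ≤ t.length → t.length + 1 - i ≤ fuel →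
    pvAOuterGo t fuel i ent mal = pvBOutside t (t.drop i) i ent mal := by
  intro fuel
  induction fuel with
  | zero => intro i ent mal hi hf; omega
  | succ fuel ih =>
    intro i ent mal hi hf
    rw [pvAOuterGo]
    by_cases hs : PySem.Chars.findFrom t ['@'] (i : Int) < 0
    · rw [dif_pos hs, pvB_out_no_at t ent mal _ i (pvFindFrom_char_none t '@' i hi hs)]
    · rw [dif_neg hs]
      obtain ⟨hp1, hp2, hp3, hp4⟩ := pvFindFrom_char_spec t '@' i hs
      set p := (PySem.Chars.findFrom t ['@'] (i : Int)).toNat with hp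
      rw [pvB_out_skip t ent mal (p - i) i p rfl hp1 hp2 hp3 hp4]
      by_cases hb : PySem.Chars.findFrom t ['{'] (p : Int) < 0
      · rw [dif_pos hb]
        have hnb : '{' ∉ t.drop p := pvFindFrom_char_none t '{' p (by omega) hb
        have hnb' : '{' ∉ t.drop (p + 1) := fun hmem =>
          hnb (by rw [List.drop_eq_getElem_cons hp2]; exact List.mem_cons_of_mem _ hmem)
        rw [pvB_seen_no_brace t p ent mal _ (p + 1) hnb']
      · rw [dif_neg hb]
        obtain ⟨hq1, hq2, hq3, hq4⟩ := pvFindFrom_char_spec t '{' p hb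
        set q := (PySem.Chars.findFrom t ['{'] (p : Int)).toNat with hq
        have hpq : p < q := by
          rcases Nat.lt_or_ge p q with h | h
          · exact h
          · have : p = q := by omega
            rw [this] at hp3
            rw [hp3] at hq3
            simp at hq3
        rw [pvB_seen_skip t p ent mal (q - (p + 1)) (p + 1) q rfl (by omega) hq2 hq3
          (fun j h1 h2 => hq4 j (by omega) h2)]
        rw [pvB_in_inner t p ent mal (t.length - (q + 1)) (q + 1) 1 rfl]
        have hstep : pvAInner t q 0 = pvAInnerGo t (t.length - (q + 1)) (q + 1) 1 := by
          have hrw : t.length - q = (t.length - (q + 1)) + 1 := by omega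
          rw [pvAInner, hrw, pvAInnerGo, dif_pos hq2]
          simp [List.getElem?_eq_getElem hq2] at hq3
          simp [hq3]
        rw [hstep]
        cases hm : pvAInnerGo t (t.length - (q + 1)) (q + 1) 1 with
        | none => rfl
        | some m =>
          obtain ⟨hm1, hm2⟩ := pvAInner_some_bounds t (t.length - (q + 1)) (q + 1) 1 m hm
          exact ih (m + 1) _ mal (by omega) (by omega)

-- ===== VERDICT (by name: the statement is the Claim_ definition above) =====
theorem split_entries_spec : Claim_equal_split_entries := by
  intro text _
  unfold Spec_split_entries split_entries split_entries_alt
  simpa using pv_main text.toList (text.toList.length + 1) 0 [] [] (Nat.zero_le _) (by omega)
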